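-- pv_equiv track=rewrite | github.com/guxinhui1991/LeetCode | Tech_Sorting1.py | balancedSplitExists
-- ===== SOURCE A (Python) =====
-- def balancedSplitExists(arr):
-- # Write your code here
--
--     arr = sorted(arr)
--     total = sum(arr)
--
--     if total%2 == 1: return False
--
--     for i in range(len(arr)):
--         if sum(arr[:i]) == total//2 and arr[i] > arr[i-1]:
--             return True
--
--     return False
-- ===== SOURCE B (Python) =====
-- def balancedSplitExists(arr):
--     s = sorted(arr)
--     total = sum(s)
--     if total % 2 == 1:
--         return False
--     half = total // 2
--     prefix = 0
--     for prev, cur in zip(s, s[1:]):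
--         prefix += prev
--         if prefix == half and cur > prev:
--             return True
--     return False
-- ===== Notes on version B (the rewrite author's own statement) =====
-- stated objective: alternative
-- what changed: B maintains a running prefix sum in one pass over adjacent pairs of the sorted list instead of recomputing sum(arr[:i]) from scratch at every index.
import Mathlib
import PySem

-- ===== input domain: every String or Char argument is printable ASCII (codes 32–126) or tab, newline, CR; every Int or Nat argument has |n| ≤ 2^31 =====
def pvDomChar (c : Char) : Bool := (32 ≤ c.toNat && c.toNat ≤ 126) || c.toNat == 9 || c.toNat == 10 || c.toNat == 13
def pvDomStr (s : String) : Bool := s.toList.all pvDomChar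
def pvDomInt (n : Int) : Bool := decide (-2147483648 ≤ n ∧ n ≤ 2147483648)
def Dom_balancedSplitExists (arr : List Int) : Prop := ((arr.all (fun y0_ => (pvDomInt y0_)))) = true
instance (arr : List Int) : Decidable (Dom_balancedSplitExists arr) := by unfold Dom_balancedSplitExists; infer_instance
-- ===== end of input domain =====

-- B replaces A's per-index re-summation sum(arr[:i]) with a running prefix sum over adjacent pairs of the sorted list (an alternative single-pass scan).


-- ===== PORT A =====
def balancedSplitExists (arr : List Int) : Bool :=
  let s := PySem.List.sorted arr (fun x => x) false
  let total := s.foldl (· + ·) 0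
  if PySem.Int.mod total 2 == 1 then false
  else
    -- for i in range(len(arr)): early return True on the condition ⇒ List.any
    (PySem.List.pyRange 0 s.length 1).any (fun i =>
      match PySem.List.pyGet? s i, PySem.List.pyGet? s (i - 1) with
      | some a, some b =>
          ((PySem.List.slice s none (some i)).foldl (· + ·) 0 == PySem.Int.floordiv total 2) && a > b
      | _, _ => false)

-- ===== PORT B =====
-- the 'for prev, cur in zip(s, s[1:])' loop with the running prefix sum
def bLoop (half : Int) (p : Int) : List Int → Bool
  | a :: b :: rest =>
      if (p + a == half) && b > a then true else bLoop half (p + a) (b :: rest)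
  | _ => false

def balancedSplitExists_alt (arr : List Int) : Bool :=
  let s := PySem.List.sorted arr (fun x => x) false
  let total := s.foldl (· + ·) 0
  if PySem.Int.mod total 2 == 1 then false
  else bLoop (PySem.Int.floordiv total 2) 0 s

-- ===== PRECONDITION & SPEC =====
def Spec_balancedSplitExists (arr : List Int) (out : Bool) : Prop := out = balancedSplitExists_alt arr
instance (arr : List Int) (out : Bool) : Decidable (Spec_balancedSplitExists arr out) := by unfold Spec_balancedSplitExists; infer_instance

-- ===== CLAIM (what is proved, stated in full; the proofs are below) =====
def Claim_equal_balancedSplitExists : Prop := ∀ (arr : List Int), Dom_balancedSplitExists arr → Spec_balancedSplitExists arr (balancedSplitExists arr)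

-- ===== LEMMAS AND PROOFS =====

theorem foldl_shift (l : List Int) (a : Int) :
    l.foldl (· + ·) a = a + l.foldl (· + ·) 0 := by
  induction l generalizing a with
  | nil => simp
  | cons x t ih =>
    simp only [List.foldl_cons]
    rw [ih (a + x), ih (0 + x)]
    ring

-- characterisation of B's loop
theorem bLoop_iff (half : Int) : ∀ (s : List Int) (p : Int),
    bLoop half p s = true ↔
      ∃ k : Nat, 0 < k ∧ ∃ hk : k < s.length,
        p + ((s.take k).foldl (· + ·) 0) = half ∧ s[k - 1]'(by omega) < s[k] := by
  intro s
  induction s with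
  | nil => intro p; simp [bLoop]
  | cons a t ih =>
    cases t with
    | nil =>
      intro p
      simp only [bLoop]
      constructor
      · intro h; exact absurd h (by simp)
      · rintro ⟨k, hk0, hk, _⟩; simp at hk; omega
    | cons b rest =>
      intro p
      simp only [bLoop]
      by_cases hc : ((p + a == half) && decide (b > a)) = true
      · simp only [hc, if_true, true_iff]
        simp only [Bool.and_eq_true, beq_iff_eq, decide_eq_true_eq] at hc
        refine ⟨1, by omega, by simp, ?_, ?_⟩
        · simpa using hc.1
        · simpa using hc.2
      · rw [if_neg hc, ih (p + a)]
        constructor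
        · rintro ⟨k, hk0, hk, hsum, hlt⟩
          refine ⟨k + 1, by omega, by simpa using Nat.succ_lt_succ hk, ?_, ?_⟩
          · have h2 : ((a :: b :: rest).take (k + 1)).foldl (· + ·) 0
                = a + ((b :: rest).take k).foldl (· + ·) 0 := by
              simp only [List.take_succ_cons, List.foldl_cons]
              rw [foldl_shift]; ring
            rw [h2]; linarith
          · cases k with
            | zero => omega
            | succ m => simpa using hlt
        · rintro ⟨k, hk0, hk, hsum, hlt⟩
          cases k with
          | zero => omega
          | succ m =>
            by_cases hm : m = 0
            · subst hm
              exfalso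
              have h1 : ((a :: b :: rest).take 1).foldl (· + ·) 0 = a := by simp
              rw [h1] at hsum
              have h2 : a < b := by simpa using hlt
              refine hc ?_
              simp only [Bool.and_eq_true, beq_iff_eq, decide_eq_true_eq, gt_iff_lt]
              exact ⟨hsum, h2⟩
            · refine ⟨m, by omega, by simp only [List.length_cons] at hk ⊢; omega, ?_, ?_⟩
              · have h2 : ((a :: b :: rest).take (m + 1)).foldl (· + ·) 0
                    = a + ((b :: rest).take m).foldl (· + ·) 0 := by
                  simp only [List.take_succ_cons, List.foldl_cons]
                  rw [foldl_shift]; ring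
                rw [h2] at hsum; linarith
              · cases m with
                | zero => omega
                | succ j => simpa using hlt

-- characterisation of A's loop over the sorted list: index 0 can never fire (arr[0] > arr[-1] fails on a sorted list)
theorem aAny_iff (s : List Int) (hs : s.Pairwise (· ≤ ·)) (half : Int) :
    ((PySem.List.pyRange 0 s.length 1).any (fun i =>
      match PySem.List.pyGet? s i, PySem.List.pyGet? s (i - 1) with
      | some a, some b => (((PySem.List.slice s none (some i)).foldl (· + ·) 0) == half) && a > b
      | _, _ => false)) = true ↔
      ∃ k : Nat, 0 < k ∧ ∃ hk : k < s.length,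
        ((s.take k).foldl (· + ·) 0) = half ∧ s[k - 1]'(by omega) < s[k] := by
  rw [PySem.List.pyRange_zero_nat]
  simp only [List.any_map, List.any_eq_true, List.mem_range, Function.comp_apply]
  constructor
  · rintro ⟨k, hk, hcond⟩
    cases k with
    | zero =>
      exfalso
      have hne : s ≠ [] := by intro h; subst h; simp at hk
      have h0 : PySem.List.pyGet? s ((0 : Nat) : Int) = some (s[0]'hk) := by
        rw [PySem.List.pyGet?_natCast]; simp [hk]
      have hneg : PySem.List.pyGet? s (((0 : Nat) : Int) - 1) = some (s.getLast hne) := by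
        have hm1 : ((0 : Nat) : Int) - 1 = -1 := by norm_num
        rw [hm1, PySem.List.pyGet?_neg_one]
        exact List.getLast?_eq_some_getLast hne
      rw [h0, hneg] at hcond
      simp only [Bool.and_eq_true, decide_eq_true_eq, gt_iff_lt] at hcond
      have hlast : s.getLast hne = s[s.length - 1]'(by omega) := List.getLast_eq_getElem hne
      have hle : s[0]'hk ≤ s[s.length - 1]'(by omega) := by
        rcases Nat.lt_or_ge 1 s.length with h2 | h2
        · exact List.pairwise_iff_getElem.mp hs 0 (s.length - 1) hk (by omega) (by omega)
        · have h3 : s.length - 1 = 0 := by omega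
          simp only [h3]
          exact le_refl _
      rw [hlast] at hcond
      omega
    | succ m =>
      have hget1 : PySem.List.pyGet? s ((m + 1 : Nat) : Int) = some (s[m + 1]'hk) := by
        rw [PySem.List.pyGet?_natCast]; simp [hk]
      have hget2 : PySem.List.pyGet? s (((m + 1 : Nat) : Int) - 1) = some (s[m]'(by omega)) := by
        have h3 : ((m + 1 : Nat) : Int) - 1 = ((m : Nat) : Int) := by push_cast; ring
        rw [h3, PySem.List.pyGet?_natCast]
        simp [show m < s.length by omega]
      rw [hget1, hget2] at hcond
      simp only [Bool.and_eq_true, beq_iff_eq, decide_eq_true_eq, gt_iff_lt] at hcond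
      refine ⟨m + 1, by omega, hk, ?_, ?_⟩
      · rw [PySem.List.slice_to_natCast] at hcond; exact hcond.1
      · simpa using hcond.2
  · rintro ⟨k, hk0, hk, hsum, hlt⟩
    refine ⟨k, hk, ?_⟩
    have hget1 : PySem.List.pyGet? s ((k : Nat) : Int) = some (s[k]'hk) := by
      rw [PySem.List.pyGet?_natCast]; simp [hk]
    have hget2 : PySem.List.pyGet? s (((k : Nat) : Int) - 1) = some (s[k - 1]'(by omega)) := by
      have h3 : ((k : Nat) : Int) - 1 = ((k - 1 : Nat) : Int) := by push_cast [hk0]; omega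
      rw [h3, PySem.List.pyGet?_natCast]
      simp [show k - 1 < s.length by omega]
    rw [hget1, hget2]
    simp only [Bool.and_eq_true, beq_iff_eq, decide_eq_true_eq, gt_iff_lt]
    exact ⟨by rw [PySem.List.slice_to_natCast]; exact hsum, hlt⟩

-- ===== VERDICT (by name: the statement is the Claim_ definition above) =====
theorem balancedSplitExists_spec : Claim_equal_balancedSplitExists := by
  intro arr _
  unfold Spec_balancedSplitExists balancedSplitExists balancedSplitExists_alt
  set s := PySem.List.sorted arr (fun x => x) false with hsdef
  set total := s.foldl (· + ·) 0
  by_cases h : (PySem.Int.mod total 2 == 1) = true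
  · rw [if_pos h, if_pos h]
  · rw [if_neg h, if_neg h]
    have hs : s.Pairwise (· ≤ ·) := by
      simpa using PySem.List.sorted_pairwise (xs := arr) (key := fun x => x)
    rw [Bool.eq_iff_iff, aAny_iff s hs (PySem.Int.floordiv total 2),
        bLoop_iff (PySem.Int.floordiv total 2) s 0]
    simp
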